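-- pv_equiv track=rewrite | github.com/ajayvenkat10/Competitive | agsfdasfd.py | solve
-- ===== SOURCE A (Python) =====
-- def solve (S,n):
--     # Your Code Here
--     arr = []
--     for i in range(len(S)-1):
--         count = 0
--         for j in range(i+1,len(S)):
--             if(S[i] > S[j]):
--                 count += 1
--
--             else:
--                 break
--
--         arr.append(count)
--
--     arr.append(0)
--
--     return arr
-- ===== SOURCE B (Python) =====
-- def solve(S, n):
--     # Monotonic stack scan from the right: each stack entry (value, count)
--     # summarises a value and the length of its run of smaller followers.
--     res = []
--     stack = []
--     for v in reversed(S):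
--         c = 0
--         while stack and stack[-1][0] < v:
--             c += stack.pop()[1] + 1
--         res.append(c)
--         stack.append((v, c))
--     res.reverse()
--     return res
-- ===== Notes on version B (the rewrite author's own statement) =====
-- stated objective: faster
-- what changed: Replaced A's nested forward scan (for each index, re-scan following elements until the first non-smaller one) by a single right-to-left pass with a monotonic stack of (value, run-length) pairs, popping and summing runs to get each count.
-- intended difference: On the empty list A returns [0] (its unconditional trailing arr.append(0) emits a count for a nonexistent element) while B returns the intended [] with one count per element of S. — e.g. on solve([], 0): A returns [0], B returns []
import Mathlib
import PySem

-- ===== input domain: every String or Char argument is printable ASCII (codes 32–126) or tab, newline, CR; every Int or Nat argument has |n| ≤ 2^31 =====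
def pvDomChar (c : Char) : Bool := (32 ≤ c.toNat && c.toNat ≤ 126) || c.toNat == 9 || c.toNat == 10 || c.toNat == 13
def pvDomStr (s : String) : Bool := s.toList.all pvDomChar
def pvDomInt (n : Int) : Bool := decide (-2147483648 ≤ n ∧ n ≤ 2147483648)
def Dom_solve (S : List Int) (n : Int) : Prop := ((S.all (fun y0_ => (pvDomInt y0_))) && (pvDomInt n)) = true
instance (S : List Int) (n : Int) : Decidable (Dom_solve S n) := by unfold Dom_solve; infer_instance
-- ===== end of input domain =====

-- B replaces A's quadratic nested scan by a linear right-to-left monotonic stack of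
-- (value, run-length) pairs (objective: faster). On the empty list A returns [0]
-- while B returns [] — see D_solve below.


-- ===== PORT A =====
-- solveInner is the inner 'for j in range(i+1, len(S))' loop with its break;
-- S[j] is always in range there, so the total pyGetD with default 0 is exact.
def solveInner (S : List Int) (si : Int) (js : List Int) (count : Int) : Int :=
  match js with
  | [] => count
  | j :: rest =>
      if si > PySem.List.pyGetD S j 0 then solveInner S si rest (count + 1) else count

def solve (S : List Int) (n : Int) : List Int :=
  ((PySem.List.pyRange 0 ((S.length : Int) - 1) 1).foldl
    (fun arr i =>
      arr ++ [solveInner S (PySem.List.pyGetD S i 0)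
                (PySem.List.pyRange (i + 1) (S.length : Int) 1) 0]) []) ++ [0]

-- ===== PORT B =====
-- popB is the 'while stack and stack[-1][0] < v' pop loop of B
def popB : List (Int × Int) → Int → Int → Int × List (Int × Int)
  | [], _, c => (c, [])
  | (pv, pc) :: stk, v, c =>
      if pv < v then popB stk v (c + pc + 1) else (c, (pv, pc) :: stk)

def solve_alt (S : List Int) (n : Int) : List Int :=
  (S.reverse.foldl
    (fun st v =>
      let p := popB st.2 v 0
      (st.1 ++ [p.1], (v, p.1) :: p.2))
    (([] : List Int), ([] : List (Int × Int)))).1.reverse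


-- ===== PRECONDITION & SPEC =====
-- On the empty list A returns [0] — a count for a nonexistent element, produced by its
-- unconditional trailing arr.append(0) — while B returns the intended [], one count per
-- element of S.
def D_solve (S : List Int) (n : Int) : Prop := S = []
instance (S : List Int) (n : Int) : Decidable (D_solve S n) := by unfold D_solve; infer_instance

def Spec_solve (S : List Int) (n : Int) (out : List Int) : Prop := ¬ D_solve S n → out = solve_alt S n
instance (S : List Int) (n : Int) (out : List Int) : Decidable (Spec_solve S n out) := by unfold Spec_solve; infer_instance

def pvDiffWitness_solve : List Int × Int := ([], 0)
def pvDiffWitnessOut_solve : (List Int) × (List Int) := ([0], [])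

-- ===== CLAIM (what is proved, stated in full; the proofs are below) =====
def Claim_unchanged_solve : Prop := ∀ (S : List Int) (n : Int), Dom_solve S n → Spec_solve S n (solve S n)
def Claim_changed_solve : Prop := Dom_solve (pvDiffWitness_solve.1) (pvDiffWitness_solve.2) ∧ D_solve (pvDiffWitness_solve.1) (pvDiffWitness_solve.2) ∧ solve (pvDiffWitness_solve.1) (pvDiffWitness_solve.2) = pvDiffWitnessOut_solve.1 ∧ solve_alt (pvDiffWitness_solve.1) (pvDiffWitness_solve.2) = pvDiffWitnessOut_solve.2 ∧ pvDiffWitnessOut_solve.1 ≠ pvDiffWitnessOut_solve.2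
def Claim_exact_solve : Prop := ∀ (S : List Int) (n : Int), Dom_solve S n → D_solve S n → solve S n ≠ solve_alt S n

-- ===== LEMMAS AND PROOFS =====

def twl (v : Int) (ts : List Int) : Nat := (ts.takeWhile (fun x => x < v)).length

def gOut : List Int → List Int
  | [] => []
  | v :: ts => ((twl v ts : Int)) :: gOut ts

inductive InvB : List (Int × Int) → List Int → Prop
  | nil : InvB [] []
  | cons (v : Int) (stk : List (Int × Int)) (suf : List Int) :
      InvB stk (suf.drop (twl v suf)) → InvB ((v, (twl v suf : Int)) :: stk) (v :: suf)

theorem drop_len_takeWhile (p : Int → Bool) (l : List Int) :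
    l.drop (l.takeWhile p).length = l.dropWhile p := by
  have h := List.takeWhile_append_dropWhile (p := p) (l := l)
  calc l.drop (l.takeWhile p).length
      = (l.takeWhile p ++ l.dropWhile p).drop (l.takeWhile p).length := by rw [h]
    _ = l.dropWhile p := List.drop_left ..

theorem twl_step (v pv : Int) (suf : List Int) (hlt : pv < v) :
    twl v (pv :: suf) = twl pv suf + 1 + twl v (suf.drop (twl pv suf)) := by
  have h1 : twl v (pv :: suf) = 1 + twl v suf := by
    simp [twl, hlt]; omega
  have hall : ∀ x ∈ suf.takeWhile (fun x => x < pv), (fun x => decide (x < v)) x = true := by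
    intro x hx
    have := List.mem_takeWhile_imp hx
    simp at this ⊢
    omega
  have h2 : twl v suf = twl pv suf + twl v (suf.drop (twl pv suf)) := by
    conv_lhs => rw [twl, ← List.takeWhile_append_dropWhile (p := fun x => decide (x < pv)) (l := suf)]
    rw [List.takeWhile_append_of_pos hall, List.length_append]
    rw [twl, twl, drop_len_takeWhile]
  omega

theorem twl_nil (v : Int) : twl v [] = 0 := rfl

theorem twl_cons_lt (v pv : Int) (suf : List Int) (hlt : pv < v) :
    twl v (pv :: suf) = twl v suf + 1 := by
  simp [twl, hlt]

theorem twl_cons_stop (v pv : Int) (suf : List Int) (h : ¬ pv < v) :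
    twl v (pv :: suf) = 0 := by
  simp [twl, h]

theorem popB_spec {stk : List (Int × Int)} {suf : List Int} (hInv : InvB stk suf) :
    ∀ (v c : Int), (popB stk v c).1 = c + (twl v suf : Int) ∧
      InvB (popB stk v c).2 (suf.drop (twl v suf)) := by
  induction hInv with
  | nil =>
      intro v c
      simp [popB, twl_nil]
      exact InvB.nil
  | cons v0 stk suf hInv ih =>
      intro v c
      by_cases hlt : v0 < v
      · have hstep := twl_step v v0 suf hlt
        have hdrop : (v0 :: suf).drop (twl v (v0 :: suf)) =
            (suf.drop (twl v0 suf)).drop (twl v (suf.drop (twl v0 suf))) := by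
          rw [hstep, List.drop_drop]
          have : twl v0 suf + 1 + twl v (suf.drop (twl v0 suf))
               = (twl v (suf.drop (twl v0 suf)) + twl v0 suf) + 1 := by omega
          rw [this, List.drop_succ_cons, Nat.add_comm]
        have h := ih v (c + (twl v0 suf : Int) + 1)
        constructor
        · simp only [popB, if_pos hlt]
          rw [h.1, hstep]
          push_cast
          ring
        · simp only [popB, if_pos hlt]
          rw [hdrop]
          exact h.2
      · constructor
        · simp [popB, if_neg hlt, twl_cons_stop v v0 suf hlt]
        · simp only [popB, if_neg hlt, twl_cons_stop v v0 suf hlt, List.drop_zero]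
          exact InvB.cons v0 stk suf hInv

theorem fold_spec (S : List Int) :
    (S.reverse.foldl
      (fun st v =>
        let p := popB st.2 v 0
        (st.1 ++ [p.1], (v, p.1) :: p.2))
      (([] : List Int), ([] : List (Int × Int)))).1 = (gOut S).reverse ∧
    InvB (S.reverse.foldl
      (fun st v =>
        let p := popB st.2 v 0
        (st.1 ++ [p.1], (v, p.1) :: p.2))
      (([] : List Int), ([] : List (Int × Int)))).2 S := by
  rw [List.foldl_reverse]
  induction S with
  | nil => exact ⟨rfl, InvB.nil⟩
  | cons v ts ih =>
      rw [List.foldr_cons]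
      obtain ⟨h1, h2⟩ := ih
      have hp := popB_spec h2 v 0
      simp only [gOut, List.reverse_cons]
      constructor
      · simp only [h1, hp.1]
        norm_num
      · have : (popB (List.foldr (fun x y => (y.1 ++ [(popB y.2 x 0).1], (x, (popB y.2 x 0).1) :: (popB y.2 x 0).2)) ([], []) ts).2 v 0).1 = (twl v ts : Int) := by
          rw [hp.1]; ring
        rw [this]
        exact InvB.cons v _ ts hp.2

theorem solve_alt_eq (S : List Int) (n : Int) : solve_alt S n = gOut S := by
  unfold solve_alt
  rw [(fold_spec S).1, List.reverse_reverse]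

theorem inner_spec (S : List Int) (v : Int) :
    ∀ (m k : Nat) (c : Int), S.length - k = m → k ≤ S.length →
    solveInner S v (PySem.List.pyRange (k : Int) (S.length : Int) 1) c
      = c + (twl v (S.drop k) : Int) := by
  intro m
  induction m with
  | zero =>
      intro k c hm hk
      have hk' : k = S.length := by omega
      subst hk'
      rw [PySem.List.pyRange_one_eq_nil (by omega)]
      simp [solveInner, twl_nil]
  | succ m ih =>
      intro k c hm hk
      have hklt : k < S.length := by omega
      rw [PySem.List.pyRange_one_cons (by exact_mod_cast hklt)]
      have hget : PySem.List.pyGetD S (k : Int) 0 = S[k] := by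
        rw [PySem.List.pyGetD_natCast, List.getD_eq_getElem _ _ hklt]
      have hdrop : S.drop k = S[k] :: S.drop (k + 1) := (List.getElem_cons_drop hklt).symm
      have hcast : (k : Int) + 1 = ((k + 1 : Nat) : Int) := by push_cast; ring
      simp only [solveInner, hget]
      by_cases hlt : S[k] < v
      · rw [if_pos (by omega), hcast, ih (k+1) (c+1) (by omega) (by omega),
          hdrop, twl_cons_lt v S[k] _ hlt]
        push_cast
        ring
      · rw [if_neg (by omega), hdrop, twl_cons_stop v S[k] _ hlt]
        simp

theorem gOut_eq_map (S : List Int) :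
    gOut S = (List.range S.length).map
      (fun i => ((twl (S.getD i 0) (S.drop (i + 1)) : Nat) : Int)) := by
  induction S with
  | nil => rfl
  | cons v ts ih =>
      rw [gOut, ih]
      simp only [List.length_cons, List.range_succ_eq_map, List.map_cons, List.map_map]
      rfl

theorem solve_eq (S : List Int) (n : Int) (h : S ≠ []) : solve S n = gOut S := by
  obtain ⟨m, hm⟩ : ∃ m, S.length = m + 1 := by
    cases S with
    | nil => exact absurd rfl h
    | cons v ts => exact ⟨ts.length, rfl⟩
  unfold solve
  rw [PySem.List.foldl_append_singleton_eq_map]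
  have hcast : ((S.length : Int) - 1) = ((m : Nat) : Int) := by omega
  rw [hcast, PySem.List.pyRange_one, List.map_map]
  have hm0 : (((m : Int)) - 0).toNat = m := by omega
  rw [hm0]
  have hmap : (List.range m).map
      ((fun i => solveInner S (PySem.List.pyGetD S i 0)
          (PySem.List.pyRange (i + 1) (S.length : Int) 1) 0) ∘ (fun k : Nat => (0 : Int) + (k : Int)))
      = (List.range m).map
        (fun i => ((twl (S.getD i 0) (S.drop (i + 1)) : Nat) : Int)) := by
    apply List.map_congr_left
    intro k hk
    have hk' : k < m := List.mem_range.mp hk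
    have hzero : (0 : Int) + (k : Int) = ((k : Nat) : Int) := by ring
    have hget : PySem.List.pyGetD S ((k : Nat) : Int) 0 = S.getD k 0 :=
      PySem.List.pyGetD_natCast ..
    have hcast2 : ((k : Nat) : Int) + 1 = (((k + 1 : Nat)) : Int) := by push_cast; ring
    simp only [Function.comp_apply, hzero, hget, hcast2]
    rw [inner_spec S (S.getD k 0) (S.length - (k+1)) (k+1) 0 rfl (by omega)]
    ring
  rw [hmap, gOut_eq_map, hm, List.range_succ, List.map_append]
  have hlast : ((twl (S.getD m 0) (S.drop (m + 1)) : Nat) : Int) = 0 := by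
    rw [List.drop_of_length_le (by omega), twl_nil]
    rfl
  simp only [List.map_cons, List.map_nil]
  rw [hlast]
  simp

-- ===== VERDICT (by name: the statement is the Claim_ definition above) =====
theorem solve_spec : Claim_unchanged_solve := by
  intro S m _ hD
  rw [solve_eq S m hD, solve_alt_eq]

theorem solve_changed : Claim_changed_solve := by unfold Claim_changed_solve; decide

theorem solve_tight : Claim_exact_solve := by
  intro S m _ hD
  subst hD
  have ha : solve [] m = [0] := rfl
  have hb : solve_alt [] m = [] := rfl
  rw [ha, hb]
  simp
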